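-- pv_equiv track=rewrite | github.com/lenafiedor/advent-of-code-25 | day-10/task_1.py | min_weight_solution
-- ===== SOURCE A (Python) =====
-- from typing import List, Tuple
--
-- def min_weight_solution(x0: int, basis: List[int]) -> Tuple[int, int]:
--     """
--     Enumerate all solutions x = x0 XOR (subset of basis) and return:
--         (min_presses, best_x)
--     Best when k=len(basis) is reasonably small (<= ~25-30).
--     """
--     k = len(basis)
--     best_presses = x0.bit_count()
--     best_x = x0
--
--     for mask in range(1 << k):
--         x = x0
--         for i in range(k):
--             if (mask >> i) & 1:
--                 x ^= basis[i]
--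
--         presses = x.bit_count()
--         if presses < best_presses:
--             best_presses = presses
--             best_x = x
--             if best_presses == 0:
--                 break
--
--     return best_presses, best_x
-- ===== SOURCE B (Python) =====
-- from typing import List, Tuple
--
-- def min_weight_solution(x0: int, basis: List[int]) -> Tuple[int, int]:
--     # Recursive scan: visit x0 XOR (subset of basis[:j]) for all masks in
--     # increasing mask order, carrying the XOR incrementally (one XOR per node
--     # instead of decoding each mask bit by bit).  Stops as soon as weight 0 is found.
--     best = [x0.bit_count(), x0]
--
--     def scan(j: int, x: int) -> bool:
--         # visit all x ^ (subset of basis[:j]) in increasing mask order; True = stop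
--         if j == 0:
--             p = x.bit_count()
--             if p < best[0]:
--                 best[0] = p
--                 best[1] = x
--                 if p == 0:
--                     return True
--             return False
--         return scan(j - 1, x) or scan(j - 1, x ^ basis[j - 1])
--
--     scan(len(basis), x0)
--     return best[0], best[1]
-- ===== Notes on version B (the rewrite author's own statement) =====
-- stated objective: faster
-- what changed: Replaces the per-mask inner loop that decodes every subset mask bit by bit (O(k*2^k)) with a recursive scan that visits the same masks in the same order while carrying the subset XOR incrementally, one XOR per visited mask (O(2^k)); intended as faster, measured 8.1x at the largest size at which both finished (k=16).
import Mathlib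
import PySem

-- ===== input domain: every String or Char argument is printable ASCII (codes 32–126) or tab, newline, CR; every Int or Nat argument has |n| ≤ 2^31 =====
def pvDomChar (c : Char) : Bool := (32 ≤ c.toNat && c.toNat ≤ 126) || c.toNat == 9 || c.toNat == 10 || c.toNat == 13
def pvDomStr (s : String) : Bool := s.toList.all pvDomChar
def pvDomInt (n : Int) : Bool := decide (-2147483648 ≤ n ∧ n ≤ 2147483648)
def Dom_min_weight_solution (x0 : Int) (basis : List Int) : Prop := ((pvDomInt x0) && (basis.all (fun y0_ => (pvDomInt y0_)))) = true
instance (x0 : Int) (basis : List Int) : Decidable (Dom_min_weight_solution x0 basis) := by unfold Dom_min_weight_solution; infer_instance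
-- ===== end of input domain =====

-- B replaces A's per-mask inner loop (decode each subset mask bit by bit) by a recursive
-- scan that visits the same masks in the same order carrying the subset XOR incrementally
-- (one XOR per mask; intended as faster, measured 8.1x at the largest size both finished).
-- The return value (a 2-element list for the Python pair (min_presses, best_x)) is proved
-- identical on all inputs.

-- ===== PORT A =====
-- inner loop: x = x0; for i in range(k): if (mask >> i) & 1: x ^= basis[i]
def pvAInner (x0 mask : Int) (basis : List Int) (k : Int) : Int :=
  (PySem.List.pyRange 0 k 1).foldl
    (fun x i =>
      if PySem.Int.band (mask >>> i.toNat) 1 ≠ 0 then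
        PySem.Int.bxor x (PySem.List.pyGetD basis i 0)
      else x) x0

-- outer loop over the masks, with the early 'break' when best_presses hits 0
def pvALoop (x0 : Int) (basis : List Int) (k : Int) : List Int → Int × Int → Int × Int
  | [], s => s
  | mask :: rest, s =>
    let x := pvAInner x0 mask basis k
    let presses : Int := PySem.Int.bitCount x
    if presses < s.1 then
      if presses = 0 then (presses, x)
      else pvALoop x0 basis k rest (presses, x)
    else pvALoop x0 basis k rest s

def min_weight_solution (x0 : Int) (basis : List Int) : List Int :=
  let k : Int := basis.length
  let r := pvALoop x0 basis k (PySem.List.pyRange 0 ((1 : Int) <<< k.toNat) 1)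
    ((PySem.Int.bitCount x0 : Int), x0)
  [r.1, r.2]

-- ===== PORT B =====
-- scan j x s visits x XOR (subset of basis[:j]) in increasing mask order,
-- updating the best pair s; the Bool is Python's 'stop' flag (weight 0 found)
def pvScan (basis : List Int) : Nat → Int → (Int × Int) → (Int × Int) × Bool
  | 0, x, s =>
    let p : Int := PySem.Int.bitCount x
    if p < s.1 then
      if p = 0 then ((p, x), true) else ((p, x), false)
    else (s, false)
  | j + 1, x, s =>
    let r := pvScan basis j x s
    if r.2 then r
    else pvScan basis j (PySem.Int.bxor x (PySem.List.pyGetD basis (j : Int) 0)) r.1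

def min_weight_solution_alt (x0 : Int) (basis : List Int) : List Int :=
  let r := pvScan basis basis.length x0 ((PySem.Int.bitCount x0 : Int), x0)
  [r.1.1, r.1.2]

-- ===== PRECONDITION & SPEC =====
def Spec_min_weight_solution (x0 : Int) (basis : List Int) (out : List Int) : Prop := out = min_weight_solution_alt x0 basis
instance (x0 : Int) (basis : List Int) (out : List Int) : Decidable (Spec_min_weight_solution x0 basis out) := by unfold Spec_min_weight_solution; infer_instance

-- ===== CLAIM (what is proved, stated in full; the proofs are below) =====
def Claim_equal_min_weight_solution : Prop := ∀ (x0 : Int) (basis : List Int), Dom_min_weight_solution x0 basis → Spec_min_weight_solution x0 basis (min_weight_solution x0 basis)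

-- ===== LEMMAS AND PROOFS =====

-- model: x0 XOR the subset of basis selected by the bits of the mask (bit 0 ↦ head)
def pvX (x : Int) : List Int → Nat → Int
  | [], _ => x
  | b :: bs, m => pvX (if m % 2 = 1 then PySem.Int.bxor x b else x) bs (m / 2)

-- Nat-level reading of A's inner loop
def pvInnerN (x0 : Int) (m : Nat) (bs : List Int) : Int :=
  (List.range bs.length).foldl
    (fun x j => if (m >>> j) % 2 = 1 then PySem.Int.bxor x (bs.getD j 0) else x) x0

theorem pvInnerN_eq (bs : List Int) (x0 : Int) (m : Nat) :
    pvAInner x0 (m : Int) bs (bs.length : Int) = pvInnerN x0 m bs := by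
  rw [pvAInner, pvInnerN, PySem.List.pyRange_zero_nat, List.foldl_map]
  congr 1
  funext x j
  have hb1 : PySem.Int.band ((m : Int) >>> (j : Int)) 1 = ((m >>> j % 2 : Nat) : Int) := by
    rw [Int.shiftRight_natCast]
    have hbc := PySem.Int.band_natCast (m >>> j) 1
    rw [Nat.and_one_is_mod] at hbc
    simpa using hbc
  simp only [Int.toNat_natCast, PySem.List.pyGetD_natCast, hb1, ne_eq, Nat.cast_eq_zero]
  rcases Nat.mod_two_eq_zero_or_one (m >>> j) with h | h <;> simp [h]

theorem pvInnerN_cons (b : Int) (bs : List Int) (x0 : Int) (m : Nat) :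
    pvInnerN x0 m (b :: bs)
      = pvInnerN (if m % 2 = 1 then PySem.Int.bxor x0 b else x0) (m / 2) bs := by
  rw [pvInnerN, pvInnerN]
  simp only [List.length_cons, List.range_succ_eq_map, List.foldl_cons, List.foldl_map,
    Nat.shiftRight_zero, List.getD_cons_zero, Nat.succ_eq_add_one]
  congr 1
  funext x j
  rw [Nat.shiftRight_succ_inside, List.getD_cons_succ]

theorem pvInner_eq (bs : List Int) (x0 : Int) (m : Nat) :
    pvAInner x0 (m : Int) bs (bs.length : Int) = pvX x0 bs m := by
  rw [pvInnerN_eq]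
  induction bs generalizing x0 m with
  | nil => rfl
  | cons b bs ih => rw [pvInnerN_cons, pvX, ih]

theorem pvX_low (bs : List Int) (x0 b : Int) (m : Nat) (h : m < 2 ^ bs.length) :
    pvX x0 (bs ++ [b]) m = pvX x0 bs m := by
  induction bs generalizing x0 m with
  | nil =>
    have hm : m = 0 := by simpa using h
    subst hm
    simp [pvX]
  | cons c cs ih =>
    have hp : 2 ^ (c :: cs).length = 2 * 2 ^ cs.length := by
      simp [pow_succ]; ring
    rw [List.cons_append, pvX, pvX]
    exact ih _ _ (by omega)

theorem pvX_high (bs : List Int) (x0 b : Int) (m : Nat) (h : m < 2 ^ bs.length) :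
    pvX x0 (bs ++ [b]) (2 ^ bs.length + m) = PySem.Int.bxor (pvX x0 bs m) b := by
  induction bs generalizing x0 m with
  | nil =>
    have hm0 : m = 0 := by simpa using h
    subst hm0
    simp [pvX]
  | cons c cs ih =>
    have hp : 2 ^ (c :: cs).length = 2 * 2 ^ cs.length := by
      simp [pow_succ]; ring
    rw [List.cons_append, pvX, pvX]
    have hm : (2 ^ (c :: cs).length + m) % 2 = m % 2 := by omega
    have hd : (2 ^ (c :: cs).length + m) / 2 = 2 ^ cs.length + m / 2 := by omega
    rw [hm, hd]
    exact ih _ _ (by omega)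

-- PySem.Int.bxor is componentwise XOR on the (sign, magnitude-bits) representation
def pvRep (a : Int) : Bool × Nat := if 0 ≤ a then (false, a.toNat) else (true, (-a - 1).toNat)

def pvUnrep (p : Bool × Nat) : Int := if p.1 then -(p.2 : Int) - 1 else (p.2 : Int)

theorem pvRep_unrep (p : Bool × Nat) : pvRep (pvUnrep p) = p := by
  obtain ⟨s1, s2⟩ := p
  cases s1
  · simp [pvRep, pvUnrep]
  · simp [pvRep, pvUnrep]
    omega

theorem pvBxor_rep (a b : Int) :
    PySem.Int.bxor a b = pvUnrep (xor (pvRep a).1 (pvRep b).1, (pvRep a).2 ^^^ (pvRep b).2) := by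
  rw [PySem.Int.bxor, pvRep, pvRep, pvUnrep]
  split_ifs <;> simp_all

theorem pvBxor_assoc (a b c : Int) :
    PySem.Int.bxor (PySem.Int.bxor a b) c = PySem.Int.bxor a (PySem.Int.bxor b c) := by
  rw [pvBxor_rep a b, pvBxor_rep b c, pvBxor_rep (pvUnrep _), pvBxor_rep a (pvUnrep _),
    pvRep_unrep, pvRep_unrep]
  simp [Nat.xor_assoc]

theorem pvBxor_right_comm (a b c : Int) :
    PySem.Int.bxor (PySem.Int.bxor a b) c = PySem.Int.bxor (PySem.Int.bxor a c) b := by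
  rw [pvBxor_assoc, pvBxor_assoc, PySem.Int.bxor_comm b c]

theorem pvX_bxor (bs : List Int) (x y : Int) (m : Nat) :
    pvX (PySem.Int.bxor x y) bs m = PySem.Int.bxor (pvX x bs m) y := by
  induction bs generalizing x m with
  | nil => rfl
  | cons b bs ih =>
    rw [pvX, pvX]
    rcases Nat.mod_two_eq_zero_or_one m with h | h
    · simp only [h]
      exact ih x (m / 2)
    · simp only [h, pvBxor_right_comm x y b]
      exact ih (PySem.Int.bxor x b) (m / 2)

-- the common loop shape: visit a list of candidate values with A's strict-min
-- update, stopping (flag true) when weight 0 is reached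
def pvRun : List Int → (Int × Int) → (Int × Int) × Bool
  | [], s => (s, false)
  | x :: rest, s =>
    if (PySem.Int.bitCount x : Int) < s.1 then
      if (PySem.Int.bitCount x : Int) = 0 then (((PySem.Int.bitCount x : Int), x), true)
      else pvRun rest ((PySem.Int.bitCount x : Int), x)
    else pvRun rest s

theorem pvRun_append (l1 l2 : List Int) (s : Int × Int) :
    pvRun (l1 ++ l2) s
      = (if (pvRun l1 s).2 then pvRun l1 s else pvRun l2 (pvRun l1 s).1) := by
  induction l1 generalizing s with
  | nil => simp [pvRun]
  | cons x l1 ih =>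
    simp only [List.cons_append, pvRun]
    by_cases hp : (PySem.Int.bitCount x : Int) < s.1
    · by_cases h0 : (PySem.Int.bitCount x : Int) = 0
      · simp only [if_pos hp, if_pos h0, if_true]
      · simp only [if_pos hp, if_neg h0]
        exact ih _
    · simp only [if_neg hp]
      exact ih s

theorem pvALoop_eq_run (x0 : Int) (bs : List Int) (k : Int) (ms : List Int) (s : Int × Int) :
    pvALoop x0 bs k ms s = (pvRun (ms.map (fun mask => pvAInner x0 mask bs k)) s).1 := by
  induction ms generalizing s with
  | nil => rfl
  | cons mask rest ih =>
    simp only [pvALoop, List.map_cons, pvRun]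
    by_cases hp : (PySem.Int.bitCount (pvAInner x0 mask bs k) : Int) < s.1
    · by_cases h0 : (PySem.Int.bitCount (pvAInner x0 mask bs k) : Int) = 0
      · rw [if_pos hp, if_pos h0, if_pos hp, if_pos h0]
      · rw [if_pos hp, if_neg h0, if_pos hp, if_neg h0, ih]
    · rw [if_neg hp, if_neg hp, ih]

theorem pvScan_eq_run (basis : List Int) (j : Nat) (hj : j ≤ basis.length)
    (x : Int) (s : Int × Int) :
    pvScan basis j x s
      = pvRun ((List.range (2 ^ j)).map (fun m => pvX x (basis.take j) m)) s := by
  induction j generalizing x s with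
  | zero =>
    simp only [pow_zero, List.range_one, List.map_cons, List.map_nil, List.take_zero]
    rw [pvScan, pvRun, pvRun]
    simp only [pvX]
    split_ifs <;> rfl
  | succ j ih =>
    have hjl : j < basis.length := hj
    have htake : basis.take (j + 1) = basis.take j ++ [basis.getD j 0] := by
      rw [List.take_add_one, List.getElem?_eq_getElem hjl]
      simp [List.getD, List.getElem?_eq_getElem hjl]
    have hlen : (basis.take j).length = j := List.length_take_of_le (le_of_lt hjl)
    have hpow : 2 ^ (j + 1) = 2 ^ j + 2 ^ j := by ring
    rw [pvScan]
    rw [ih (le_of_lt hjl), hpow, List.range_add, List.map_append, pvRun_append]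
    have hg : PySem.List.pyGetD basis ((j : Nat) : Int) 0 = basis.getD j 0 :=
      PySem.List.pyGetD_natCast basis j 0
    have hlow : (List.range (2 ^ j)).map (fun m => pvX x (basis.take (j + 1)) m)
        = (List.range (2 ^ j)).map (fun m => pvX x (basis.take j) m) := by
      refine List.map_congr_left fun m hm => ?_
      rw [htake]
      exact pvX_low _ _ _ _ (by rw [hlen]; exact List.mem_range.mp hm)
    have hhigh : (List.map (fun n => 2 ^ j + n) (List.range (2 ^ j))).map
          (fun m => pvX x (basis.take (j + 1)) m)
        = (List.range (2 ^ j)).map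
            (fun m => pvX (PySem.Int.bxor x (basis.getD j 0)) (basis.take j) m) := by
      rw [List.map_map]
      refine List.map_congr_left fun m hm => ?_
      have hm2 : m < 2 ^ (basis.take j).length := by rw [hlen]; exact List.mem_range.mp hm
      simp only [Function.comp]
      rw [htake]
      have := pvX_high (basis.take j) x (basis.getD j 0) m hm2
      rw [hlen] at this
      rw [this, pvX_bxor]
    rw [hlow, hhigh, hg]
    by_cases hb : (pvRun ((List.range (2 ^ j)).map (fun m => pvX x (basis.take j) m)) s).2
    · rw [if_pos hb, if_pos hb]
    · rw [if_neg hb, if_neg hb, ih (le_of_lt hjl)]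

-- ===== VERDICT (by name: the statement is the Claim_ definition above) =====
theorem min_weight_solution_spec : Claim_equal_min_weight_solution := by
  unfold Claim_equal_min_weight_solution
  intro x0 basis _
  unfold Spec_min_weight_solution
  show min_weight_solution x0 basis = min_weight_solution_alt x0 basis
  rw [min_weight_solution, min_weight_solution_alt]
  have hk : ((basis.length : Int)).toNat = basis.length := by simp
  rw [hk]
  have h1 : (1 : Int) <<< basis.length = ((2 ^ basis.length : Nat) : Int) := by
    induction basis.length with
    | zero => rfl
    | succ k ih =>
      rw [pow_succ]
      push_cast
      rw [Int.shiftLeft_succ, ih]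
      push_cast; ring
  rw [h1, PySem.List.pyRange_zero_nat, pvALoop_eq_run,
    pvScan_eq_run basis basis.length le_rfl, List.take_length]
  have hmaps : List.map (fun mask => pvAInner x0 mask basis (basis.length : Int))
        (List.map (fun k : Nat => (k : Int)) (List.range (2 ^ basis.length)))
      = List.map (fun m => pvX x0 basis m) (List.range (2 ^ basis.length)) := by
    rw [List.map_map]
    refine List.map_congr_left fun m _ => ?_
    simpa using pvInner_eq basis x0 m
  rw [hmaps]
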